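-- pv_equiv track=rewrite | github.com/yuyash/visionmate | src/visionmate/core/recognition/question_segmenter.py | _looks_like_question
-- ===== SOURCE A (Python) =====
-- def _looks_like_question(text: str) -> bool:
--     """Simple heuristic to detect if text looks like a question.
--
--     This is a placeholder implementation. In production, this would
--     use VLM-based semantic analysis.
--
--     Args:
--         text: Text to analyze
--
--     Returns:
--         True if text appears to be a question
--     """
--     if not text:
--         return False
--
--     text_lower = text.lower().strip()
--
--     # Check for question marks
--     if "?" in text:
--         return True
--
--     # Check for question words at the start
--     question_words = [
--         "what",
--         "when",
--         "where",
--         "who",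
--         "why",
--         "how",
--         "is",
--         "are",
--         "can",
--         "could",
--         "would",
--         "should",
--         "do",
--         "does",
--         "did",
--     ]
--
--     for word in question_words:
--         if text_lower.startswith(word + " "):
--             return True
--
--     return False
-- ===== SOURCE B (Python) =====
-- _QUESTION_WORDS = (
--     "what", "when", "where", "who", "why", "how",
--     "is", "are", "can", "could", "would", "should",
--     "do", "does", "did",
-- )
--
--
-- def _looks_like_question(text: str) -> bool:
--     if not text:
--         return False
--     if "?" in text:
--         return True
--     # Single pass over the characters: accumulate the leading token and
--     # decide at the first space; no space at all means no question word.
--     token = ""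
--     for ch in text.lower().strip():
--         if ch == " ":
--             return token in _QUESTION_WORDS
--         token += ch
--     return False
-- ===== Notes on version B (the rewrite author's own statement) =====
-- stated objective: alternative
-- what changed: A loops over 15 candidate question words testing each as a startswith prefix; B instead makes a single character-level scan with an accumulator, building the leading token until the first space and doing one membership check there, so the per-word prefix scans disappear.
import Mathlib
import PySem

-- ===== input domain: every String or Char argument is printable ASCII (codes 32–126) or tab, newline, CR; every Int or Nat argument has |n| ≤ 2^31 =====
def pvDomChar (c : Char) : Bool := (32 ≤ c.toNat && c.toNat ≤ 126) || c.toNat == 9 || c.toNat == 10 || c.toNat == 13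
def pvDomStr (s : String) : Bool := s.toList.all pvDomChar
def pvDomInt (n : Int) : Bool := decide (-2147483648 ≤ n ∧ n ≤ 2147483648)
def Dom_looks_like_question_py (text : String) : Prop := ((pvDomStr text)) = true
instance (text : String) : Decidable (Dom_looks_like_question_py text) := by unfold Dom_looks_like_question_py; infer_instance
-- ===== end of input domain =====

-- ===== PORT A =====
-- B replaces A's 15-fold startswith scan by a single character scan that accumulates
-- the leading token and decides at the first space (alternative decomposition; same results).
def pvQuestionWords : List String :=
  ["what", "when", "where", "who", "why", "how", "is", "are", "can", "could",
   "would", "should", "do", "does", "did"]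

def looks_like_question_py (text : String) : Bool :=
  if text == "" then false
  else
    let text_lower := PySem.Str.strip (PySem.Str.lower text)
    if PySem.Str.isIn "?" text then true
    else
      pvQuestionWords.any (fun word => PySem.Str.startswith text_lower (word ++ " "))

-- ===== PORT B =====
def pvQuestionWordsB : List String :=
  ["what", "when", "where", "who", "why", "how", "is", "are", "can", "could",
   "would", "should", "do", "does", "did"]

-- the `for ch in …` loop of Source B: accumulate the token, decide at the first space
def pvFirstTokenLoop : List Char → List Char → Bool
  | [], _ => false
  | c :: rest, token =>
      if c = ' ' then pvQuestionWordsB.contains (String.ofList token)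
      else pvFirstTokenLoop rest (token ++ [c])

def looks_like_question_py_alt (text : String) : Bool :=
  if text == "" then false
  else if PySem.Str.isIn "?" text then true
  else pvFirstTokenLoop (PySem.Str.strip (PySem.Str.lower text)).toList []

-- ===== PRECONDITION & SPEC =====
def Spec_looks_like_question_py (text : String) (out : Bool) : Prop := out = looks_like_question_py_alt text
instance (text : String) (out : Bool) : Decidable (Spec_looks_like_question_py text out) := by unfold Spec_looks_like_question_py; infer_instance

-- ===== CLAIM (what is proved, stated in full; the proofs are below) =====
def Claim_equal_looks_like_question_py : Prop := ∀ (text : String), Dom_looks_like_question_py text → Spec_looks_like_question_py text (looks_like_question_py text)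

-- ===== LEMMAS AND PROOFS =====

-- split a char list at its first space: none if no space, else (before, after)
def pvSplitSp : List Char → Option (List Char × List Char)
  | [] => none
  | c :: rest => if c = ' ' then some ([], rest) else (pvSplitSp rest).map (fun p => (c :: p.1, p.2))

theorem pvSplitSp_eq_none {cs : List Char} : pvSplitSp cs = none ↔ ' ' ∉ cs := by
  induction cs with
  | nil => simp [pvSplitSp]
  | cons c rest ih =>
      by_cases hc : c = ' '
      · simp [pvSplitSp, hc]
      · simp [pvSplitSp, hc, Option.map_eq_none_iff, ih, Ne.symm hc]

theorem pvSplitSp_eq_some {cs a b : List Char} (h : pvSplitSp cs = some (a, b)) :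
    cs = a ++ ' ' :: b ∧ ' ' ∉ a := by
  induction cs generalizing a b with
  | nil => simp [pvSplitSp] at h
  | cons c rest ih =>
      by_cases hc : c = ' '
      · simp [pvSplitSp, hc] at h
        obtain ⟨h1, h2⟩ := h
        subst h1; subst h2
        simp [hc]
      · simp only [pvSplitSp, if_neg hc, Option.map_eq_some_iff] at h
        obtain ⟨⟨a', b'⟩, hp, he⟩ := h
        obtain ⟨h1, h2⟩ := ih hp
        cases he
        simp [h1, h2, Ne.symm hc]

-- B's loop computes: false if no space, else membership of (acc ++ first token)
theorem pvFirstTokenLoop_eq (cs : List Char) : ∀ (acc : List Char),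
    pvFirstTokenLoop cs acc =
      match pvSplitSp cs with
      | none => false
      | some (a, _) => pvQuestionWordsB.contains (String.ofList (acc ++ a)) := by
  induction cs with
  | nil => intro acc; simp [pvFirstTokenLoop, pvSplitSp]
  | cons c rest ih =>
      intro acc
      by_cases hc : c = ' '
      · simp [pvFirstTokenLoop, pvSplitSp, hc]
      · simp only [pvFirstTokenLoop, if_neg hc, pvSplitSp, ih]
        cases hsp : pvSplitSp rest with
        | none => simp
        | some p => cases p with
          | mk a b => simp

theorem pv_prefix_iff (a b w : List Char) (ha : ' ' ∉ a) (hw : ' ' ∉ w) :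
    List.isPrefixOf (w ++ [' ']) (a ++ ' ' :: b) = (w == a) := by
  by_cases h : w = a
  · subst h
    have h1 : List.isPrefixOf (w ++ [' ']) (w ++ ' ' :: b) = true := by
      rw [List.isPrefixOf_iff_prefix]
      exact ⟨b, by simp⟩
    rw [h1, beq_self_eq_true]
  · rw [beq_eq_false_iff_ne.mpr h, Bool.eq_false_iff]
    intro hcontra
    rw [List.isPrefixOf_iff_prefix] at hcontra
    apply h
    obtain ⟨t, ht⟩ := hcontra
    have ht' : w ++ ' ' :: t = a ++ ' ' :: b := by simpa using ht
    rcases List.append_eq_append_iff.mp ht' with ⟨a', h1, h2⟩ | ⟨c', h1, h2⟩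
    · cases a' with
      | nil => exact (by simpa using h1 : a = w).symm
      | cons x xs =>
          exfalso
          have : x = ' ' := by simpa using congrArg (fun l => l.head?) h2.symm
          exact ha (by simp [h1, this])
    · cases c' with
      | nil => simpa using h1
      | cons x xs =>
          exfalso
          have : ' ' = x := by simpa using congrArg (fun l => l.head?) h2
          exact hw (by simp [h1, ← this])

theorem pv_toList_ofList (cs : List Char) : (String.ofList cs).toList = cs := by
  simp

theorem pv_any_eq_contains (L : List String) (hL : ∀ w ∈ L, ' ' ∉ w.toList)
    (a b : List Char) (ha : ' ' ∉ a) :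
    (L.any fun w => PySem.Chars.startswith (a ++ ' ' :: b) (w.toList ++ [' '])) =
      L.contains (String.ofList a) := by
  induction L with
  | nil => simp
  | cons w rest ih =>
      have hw : ' ' ∉ w.toList := hL w (by simp)
      have hrest : ∀ x ∈ rest, ' ' ∉ x.toList := fun x hx => hL x (by simp [hx])
      simp only [List.any_cons, List.contains_cons, ih hrest]
      congr 1
      rw [show PySem.Chars.startswith (a ++ ' ' :: b) (w.toList ++ [' ']) =
            List.isPrefixOf (w.toList ++ [' ']) (a ++ ' ' :: b) from rfl,
          pv_prefix_iff a b w.toList ha hw]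
      by_cases h : w.toList = a
      · have hw2 : String.ofList a = w := by
          rw [← String.toList_inj, pv_toList_ofList, h]
        simp [h, hw2]
      · have hne : String.ofList a ≠ w := by
          intro he; exact h (by simp [← he])
        simp [h, hne]

theorem pv_no_space_no_prefix (cs w : List Char) (h : ' ' ∉ cs) :
    PySem.Chars.startswith cs (w ++ [' ']) = false := by
  rw [show PySem.Chars.startswith cs (w ++ [' ']) = List.isPrefixOf (w ++ [' ']) cs from rfl]
  rw [Bool.eq_false_iff]
  intro hc
  rw [List.isPrefixOf_iff_prefix] at hc
  exact h (hc.subset (by simp))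

theorem pv_words_no_space : ∀ w ∈ pvQuestionWords, ' ' ∉ w.toList := by decide

-- ===== VERDICT (by name: the statement is the Claim_ definition above) =====
theorem looks_like_question_py_spec : Claim_equal_looks_like_question_py := by
  intro text _
  unfold Spec_looks_like_question_py looks_like_question_py looks_like_question_py_alt
  by_cases h0 : (text == "") = true
  · rw [if_pos h0, if_pos h0]
  · simp only [if_neg h0]
    by_cases hq : PySem.Str.isIn "?" text = true
    · rw [if_pos hq, if_pos hq]
    · simp only [if_neg hq]
      set tlS := PySem.Str.strip (PySem.Str.lower text) with htlS
      rw [pvFirstTokenLoop_eq tlS.toList []]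
      cases hsp : pvSplitSp tlS.toList with
      | none =>
          have hns : ' ' ∉ tlS.toList := pvSplitSp_eq_none.mp hsp
          have hany : (pvQuestionWords.any fun word => PySem.Str.startswith tlS (word ++ " ")) = false := by
            rw [List.any_eq_false]
            intro w _
            rw [PySem.Str.startswith_eq]
            have he : (w ++ " ").toList = w.toList ++ [' '] := by simp
            rw [he, Bool.not_eq_true]
            exact pv_no_space_no_prefix tlS.toList w.toList hns
          rw [hany]
      | some p =>
          obtain ⟨a, b⟩ := p
          obtain ⟨hcs, hna⟩ := pvSplitSp_eq_some hsp
          have hfun : (fun (word : String) => PySem.Str.startswith tlS (word ++ " ")) =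
              fun word => PySem.Chars.startswith (a ++ ' ' :: b) (word.toList ++ [' ']) := by
            funext w
            rw [PySem.Str.startswith_eq]
            have he : (w ++ " ").toList = w.toList ++ [' '] := by simp
            rw [he, hcs]
          rw [hfun, pv_any_eq_contains pvQuestionWords pv_words_no_space a b hna]
          have hq2 : pvQuestionWordsB = pvQuestionWords := by decide
          simp [hq2]
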